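-- pv_equiv track=rewrite | github.com/EricH3344/ESS-Governance-Assistant | save.py | match_role_header
-- ===== SOURCE A (Python) =====
-- from typing import List, Dict, Any, Optional
--
-- def normalize_header_candidate(line: str) -> str:
--     s = line.strip()
--     # strip bullet
--     if s.startswith("*") or s.startswith("-"):
--         s = s[1:].strip()
--     # strip trailing colon
--     if s.endswith(":"):
--         s = s[:-1].strip()
--     return s
--
-- def match_role_header(line: str, roles_in_meeting: dict[str, str]) -> Optional[str]:
--     """
--     Fuzzy match a header line to a role from attendance.
--     """
--     candidate = normalize_header_candidate(line)
--     if not candidate: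
--         return None
--
--     # 1) Exact match
--     for role in roles_in_meeting:
--         if candidate == role:
--             return role
--
--     # 2) Prefix / containment match (your original logic)
--     for role in roles_in_meeting:
--         if candidate.startswith(role) or role.startswith(candidate):
--             return role
--
--     # 3) NEW: substring fuzzy match
--     #    "President" in "Co-President"
--     #    "Finance" in "VP Finance & Administration"
--     #    "Sponsorship" in "Manager of Sponsorship"
--     cand_lower = candidate.lower()
--     for role in roles_in_meeting:
--         role_lower = role.lower()
--         if cand_lower in role_lower or role_lower in cand_lower:
--             return role
--
--     return None
-- ===== SOURCE B (Python) =====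
-- def match_role_header(line, roles_in_meeting):
--     # single ordered pass: per-role match tier, keep the earliest role at the lowest tier;
--     # a tier check is only evaluated while it could still improve the current best
--     s = line.strip()
--     if s.startswith(("*", "-")):
--         s = s[1:].strip()
--     if s.endswith(":"):
--         s = s[:-1].strip()
--     candidate = s
--     if not candidate:
--         return None
--     cand_lower = candidate.lower()
--     best, best_tier = None, 3
--     for role in roles_in_meeting:
--         if candidate == role:
--             best = role
--             break
--         if best_tier > 1 and (candidate.startswith(role) or role.startswith(candidate)):
--             best, best_tier = role, 1
--         elif best_tier > 2 and (cand_lower in role.lower() or role.lower() in cand_lower):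
--             best, best_tier = role, 2
--     return best
-- ===== Notes on version B (the rewrite author's own statement) =====
-- stated objective: alternative
-- what changed: Replaces A's three sequential passes over the role list by one pass that assigns each role a match tier (0 exact, 1 prefix, 2 lowercase substring), keeps the earliest role at the strictly lowest tier, breaks on an exact match and skips checks that can no longer improve the best.
import Mathlib
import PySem

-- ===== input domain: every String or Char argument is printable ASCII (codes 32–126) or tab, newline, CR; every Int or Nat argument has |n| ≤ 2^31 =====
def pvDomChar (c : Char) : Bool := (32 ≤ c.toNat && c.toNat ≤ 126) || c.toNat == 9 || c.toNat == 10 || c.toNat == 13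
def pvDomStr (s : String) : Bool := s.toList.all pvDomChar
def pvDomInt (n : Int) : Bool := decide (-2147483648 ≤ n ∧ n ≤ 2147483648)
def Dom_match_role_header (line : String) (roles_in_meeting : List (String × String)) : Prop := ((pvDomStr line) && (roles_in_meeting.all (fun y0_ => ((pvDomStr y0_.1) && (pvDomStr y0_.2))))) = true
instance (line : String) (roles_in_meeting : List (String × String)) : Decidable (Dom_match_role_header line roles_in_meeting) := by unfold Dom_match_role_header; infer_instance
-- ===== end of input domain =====

-- B replaces A's three sequential passes by one pass tracking the earliest role at the lowest match tier (objective: alternative, same cost).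

-- ===== PORT A =====
def normalize_header_candidate (line : String) : String :=
  let s := PySem.Str.strip line
  let s := if PySem.Str.startswith s "*" || PySem.Str.startswith s "-" then
             PySem.Str.strip (PySem.Str.slice s (some 1) none) else s
  let s := if PySem.Str.endswith s ":" then
             PySem.Str.strip (PySem.Str.slice s none (some (-1))) else s
  s

def match_role_header (line : String) (roles_in_meeting : List (String × String)) : Option String :=
  let candidate := normalize_header_candidate line
  if candidate = "" then none
  else
    let ks := (PySem.Dict.ofList roles_in_meeting).keys
    match ks.find? (fun role => candidate == role) with
    | some role => some role
    | none =>
      match ks.find? (fun role => PySem.Str.startswith candidate role || PySem.Str.startswith role candidate) with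
      | some role => some role
      | none =>
        let cand_lower := PySem.Str.lower candidate
        ks.find? (fun role => PySem.Str.isIn cand_lower (PySem.Str.lower role) || PySem.Str.isIn (PySem.Str.lower role) cand_lower)

-- ===== PORT B =====
-- the loop of Source B: strict improvement on a match tier (0 exact, 1 prefix, 2 lowercase substring);
-- break on an exact match, and a tier check is only evaluated while it could still improve the best
def altLoop (candidate cand_lower : String) (best : Option String × Nat) : List String → Option String × Nat
  | [] => best
  | role :: ks =>
    if candidate == role then (some role, 0)
    else if 1 < best.2 &&
            (PySem.Str.startswith candidate role || PySem.Str.startswith role candidate) then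
      altLoop candidate cand_lower (some role, 1) ks
    else if 2 < best.2 &&
            (PySem.Str.isIn cand_lower (PySem.Str.lower role) ||
             PySem.Str.isIn (PySem.Str.lower role) cand_lower) then
      altLoop candidate cand_lower (some role, 2) ks
    else altLoop candidate cand_lower best ks

def match_role_header_alt (line : String) (roles_in_meeting : List (String × String)) : Option String :=
  let s := PySem.Str.strip line
  let s := if PySem.Str.startswith s "*" || PySem.Str.startswith s "-" then
             PySem.Str.strip (PySem.Str.slice s (some 1) none) else s
  let s := if PySem.Str.endswith s ":" then
             PySem.Str.strip (PySem.Str.slice s none (some (-1))) else s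
  let candidate := s
  if candidate = "" then none
  else
    let cand_lower := PySem.Str.lower candidate
    (altLoop candidate cand_lower (none, 3) (PySem.Dict.ofList roles_in_meeting).keys).1

-- ===== PRECONDITION & SPEC =====
def Spec_match_role_header (line : String) (roles_in_meeting : List (String × String)) (out : Option String) : Prop := out = match_role_header_alt line roles_in_meeting
instance (line : String) (roles_in_meeting : List (String × String)) (out : Option String) : Decidable (Spec_match_role_header line roles_in_meeting out) := by unfold Spec_match_role_header; infer_instance

-- ===== CLAIM (what is proved, stated in full; the proofs are below) =====
def Claim_equal_match_role_header : Prop := ∀ (line : String) (roles_in_meeting : List (String × String)), Dom_match_role_header line roles_in_meeting → Spec_match_role_header line roles_in_meeting (match_role_header line roles_in_meeting)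

-- ===== LEMMAS AND PROOFS =====

-- from a tier-1 best, only an exact match can still win
lemma altLoop_one (c cl : String) (ks : List String) (r : String) :
    (altLoop c cl (some r, 1) ks).1 =
      match ks.find? (fun role => c == role) with
      | some role => some role
      | none => some r := by
  induction ks with
  | nil => rfl
  | cons k ks ih =>
    by_cases h0 : (c == k) = true
    · simp only [altLoop, List.find?_cons, h0]
      simp
    · simp only [altLoop, List.find?_cons, h0]
      simpa using ih

-- from a tier-2 best, an exact or prefix match can still win
lemma altLoop_two (c cl : String) (ks : List String) (r : String) :
    (altLoop c cl (some r, 2) ks).1 =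
      match ks.find? (fun role => c == role) with
      | some role => some role
      | none =>
        match ks.find? (fun role => PySem.Str.startswith c role || PySem.Str.startswith role c) with
        | some role => some role
        | none => some r := by
  induction ks with
  | nil => rfl
  | cons k ks ih =>
    by_cases h0 : (c == k) = true
    · simp only [altLoop, List.find?_cons, h0]
      simp
    · by_cases h1 : (PySem.Str.startswith c k || PySem.Str.startswith k c) = true
      · simp only [altLoop, List.find?_cons, h0, h1]
        simp [altLoop_one]
      · simp only [altLoop, List.find?_cons, h0, h1]
        simpa using ih

-- the single strict-improvement pass equals the three sequential searches
lemma altLoop_eq (c cl : String) (ks : List String) :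
    (altLoop c cl (none, 3) ks).1 =
      match ks.find? (fun role => c == role) with
      | some role => some role
      | none =>
        match ks.find? (fun role => PySem.Str.startswith c role || PySem.Str.startswith role c) with
        | some role => some role
        | none =>
          ks.find? (fun role => PySem.Str.isIn cl (PySem.Str.lower role) ||
                                PySem.Str.isIn (PySem.Str.lower role) cl) := by
  induction ks with
  | nil => rfl
  | cons k ks ih =>
    by_cases h0 : (c == k) = true
    · simp only [altLoop, List.find?_cons, h0]
      simp
    · by_cases h1 : (PySem.Str.startswith c k || PySem.Str.startswith k c) = true
      · simp only [altLoop, List.find?_cons, h0, h1]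
        simp [altLoop_one]
      · by_cases h2 : (PySem.Str.isIn cl (PySem.Str.lower k) ||
                       PySem.Str.isIn (PySem.Str.lower k) cl) = true
        · simp only [altLoop, List.find?_cons, h0, h1, h2]
          simp [altLoop_two]
        · simp only [altLoop, List.find?_cons, h0, h1, h2]
          simpa using ih

-- ===== VERDICT (by name: the statement is the Claim_ definition above) =====
theorem match_role_header_spec : Claim_equal_match_role_header := by
  intro line roles _
  unfold Spec_match_role_header match_role_header match_role_header_alt normalize_header_candidate
  dsimp only
  split_ifs <;> first | rfl | exact (altLoop_eq _ _ _).symm
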